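-- pv_equiv track=rewrite | github.com/rojopolis/Take-Terraform-to-the-Next-Level | app/lambda/functions/crud_handler/app.py | field_count_by_scale
-- ===== SOURCE A (Python) =====
-- from itertools import groupby
-- from operator import itemgetter
--
-- def _groupby(field_name, data):
--     # skip items lacking the field
--     filtered = [x for x in data if field_name in x]
--
--     # do same as cytoolz groupby but using standard lib
--     filtered.sort(key=itemgetter(field_name))
--     grouped = {i:list(j) for i,j in groupby(filtered, itemgetter(field_name))}
--     return grouped
--
-- def field_count_by_scale(field_name, data, indices, group_field='Choice', keys=None):
--     responses = []
--     if group_field == 'Sentiment':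
--         # Sentiment is sparely populated, so replace non-response with
--         # value that won't be reported
--         for row in data:
--             if 'Sentiment' not in row:
--                 row['Sentiment'] = len(indices)
--
--     grouped = _groupby(field_name, data)
--
--     # All fields except Date have a set number of possible responses
--     keys = range(len(keys)) if keys else sorted(grouped.keys())
--
--     for i in keys:
--         group = grouped.get(i, [])
--         response = [len(_groupby(group_field, group).get(x, [])) for x in indices]
--         responses.append(response)
--
--     return responses
-- ===== SOURCE B (Python) =====
-- def field_count_by_scale(field_name, data, indices, group_field='Choice', keys=None):
--     # One pass over the rows counting (field value, group value) pairs in a dict,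
--     # instead of re-sorting/regrouping the group inside the keys x indices loops.
--     # Does not mutate `data` (A fills missing 'Sentiment' keys in place).
--     fill = len(indices) if group_field == 'Sentiment' else None
--
--     def lookup(row, key):
--         v = row.get(key)
--         if v is None and key == 'Sentiment':
--             return fill
--         return v
--
--     counts = {}
--     fvals = set()
--     for row in data:
--         fv = lookup(row, field_name)
--         if fv is None:
--             continue
--         fvals.add(fv)
--         gv = lookup(row, group_field)
--         if gv is None:
--             continue
--         pair = (fv, gv)
--         counts[pair] = counts.get(pair, 0) + 1
--
--     ks = range(len(keys)) if keys else sorted(fvals)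
--     return [[counts.get((i, x), 0) for x in indices] for i in ks]
-- ===== Notes on version B (the rewrite author's own statement) =====
-- stated objective: faster
-- what changed: B replaces A's repeated sort-and-regroup (a _groupby of the whole data plus a fresh _groupby of the key's group for every key and every index) by a single counting pass that builds one (field value, group value) -> count dictionary and the set of field values, then reads each cell off the dictionary.
import Mathlib
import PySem

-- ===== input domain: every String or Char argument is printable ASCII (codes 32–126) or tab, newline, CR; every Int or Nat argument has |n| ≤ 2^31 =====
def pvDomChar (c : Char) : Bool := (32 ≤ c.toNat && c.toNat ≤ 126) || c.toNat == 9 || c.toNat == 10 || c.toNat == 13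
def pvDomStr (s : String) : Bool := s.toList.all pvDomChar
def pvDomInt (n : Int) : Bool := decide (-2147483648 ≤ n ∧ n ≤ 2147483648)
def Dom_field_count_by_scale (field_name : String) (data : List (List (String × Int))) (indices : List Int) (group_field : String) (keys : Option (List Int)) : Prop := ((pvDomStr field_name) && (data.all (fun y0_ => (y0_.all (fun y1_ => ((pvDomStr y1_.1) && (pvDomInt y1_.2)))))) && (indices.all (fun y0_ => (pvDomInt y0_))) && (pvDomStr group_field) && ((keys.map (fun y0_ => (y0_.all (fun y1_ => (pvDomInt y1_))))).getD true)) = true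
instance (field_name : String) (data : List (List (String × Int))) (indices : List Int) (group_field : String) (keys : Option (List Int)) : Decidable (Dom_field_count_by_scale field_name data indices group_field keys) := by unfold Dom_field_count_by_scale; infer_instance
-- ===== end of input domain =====

-- B replaces the per-key, per-index re-sorting/regrouping of A by one counting pass over the rows.
-- Equivalence is about the RETURN value: A mutates `data` rows in place (fills missing 'Sentiment'
-- keys when group_field == 'Sentiment'); B does not mutate its arguments.

-- ===== PORT A =====
-- _groupby(field_name, data): filter rows having the field, sort by its value,
-- then build the dict {value: rows} (the groupby-of-a-sorted-list dict IS this fold).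
def pvGroupbyA (f : String) (data : List (List (String × Int))) :
    PySem.Dict Int (List (List (String × Int))) :=
  let filtered := data.filter (fun r => (PySem.Dict.mk r).contains f)
  let sortedF := PySem.List.sorted filtered (fun r => (PySem.Dict.mk r).getD f 0) false
  (sortedF.map (fun r => ((PySem.Dict.mk r).getD f 0, r))).foldl
    (fun d p => d.modify p.1 [] (· ++ [p.2])) PySem.Dict.empty

-- body of A's 'for row in data: if "Sentiment" not in row: row["Sentiment"] = len(indices)'
def pvSentFillA (n : Int) (r : List (String × Int)) : List (String × Int) :=
  if (PySem.Dict.mk r).contains "Sentiment" then r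
  else ((PySem.Dict.mk r).insert "Sentiment" n).items

def field_count_by_scale (field_name : String) (data : List (List (String × Int))) (indices : List Int) (group_field : String) (keys : Option (List Int)) : List (List Int) :=
  let data' := if group_field == "Sentiment"
    then data.map (pvSentFillA (indices.length : Int)) else data
  let grouped := pvGroupbyA field_name data'
  let ks : List Int :=
    match keys with
    | some l => if l.isEmpty
        then PySem.List.sorted grouped.keys (fun x => x) false
        else (List.range l.length).map (fun n => (n : Int))
    | none => PySem.List.sorted grouped.keys (fun x => x) false
  ks.foldl (fun responses i =>
      responses ++ [indices.map (fun x =>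
        (((pvGroupbyA group_field (grouped.getD i [])).getD x []).length : Int))]) []

-- ===== PORT B =====
-- row lookup with the 'Sentiment' default substituted for a missing value
def pvLookupB (fill : Option Int) (r : List (String × Int)) (k : String) : Option Int :=
  match (PySem.Dict.mk r).get? k with
  | none => if k == "Sentiment" then fill else none
  | some v => some v

-- body of B's single counting loop: state = (pair counter, set of field values)
def pvStepB (fill : Option Int) (f g : String)
    (s : PySem.Dict (Int × Int) Int × PySem.Set Int) (r : List (String × Int)) :
    PySem.Dict (Int × Int) Int × PySem.Set Int :=
  match pvLookupB fill r f with
  | none => s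
  | some fv =>
    let fvals := PySem.Set.add s.2 fv
    match pvLookupB fill r g with
    | none => (s.1, fvals)
    | some gv => (s.1.insert (fv, gv) (s.1.getD (fv, gv) 0 + 1), fvals)

def field_count_by_scale_alt (field_name : String) (data : List (List (String × Int))) (indices : List Int) (group_field : String) (keys : Option (List Int)) : List (List Int) :=
  let fill : Option Int := if group_field == "Sentiment" then some (indices.length : Int) else none
  let st := data.foldl (pvStepB fill field_name group_field) (PySem.Dict.empty, PySem.Set.empty)
  let ks : List Int :=
    match keys with
    | some l => if l.isEmpty then PySem.List.sorted st.2 (fun x => x) false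
                else (List.range l.length).map (fun n => (n : Int))
    | none => PySem.List.sorted st.2 (fun x => x) false
  ks.map (fun i => indices.map (fun x => st.1.getD (i, x) 0))

-- ===== PRECONDITION & SPEC =====
def Spec_field_count_by_scale (field_name : String) (data : List (List (String × Int))) (indices : List Int) (group_field : String) (keys : Option (List Int)) (out : List (List Int)) : Prop := out = field_count_by_scale_alt field_name data indices group_field keys
instance (field_name : String) (data : List (List (String × Int))) (indices : List Int) (group_field : String) (keys : Option (List Int)) (out : List (List Int)) : Decidable (Spec_field_count_by_scale field_name data indices group_field keys out) := by unfold Spec_field_count_by_scale; infer_instance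

-- ===== CLAIM (what is proved, stated in full; the proofs are below) =====
def Claim_equal_field_count_by_scale : Prop := ∀ (field_name : String) (data : List (List (String × Int))) (indices : List Int) (group_field : String) (keys : Option (List Int)), Dom_field_count_by_scale field_name data indices group_field keys → Spec_field_count_by_scale field_name data indices group_field keys (field_count_by_scale field_name data indices group_field keys)

-- ===== LEMMAS AND PROOFS =====

-- the per-row substitution A performs agrees with B's lookup
theorem pvLookup_none (r : List (String × Int)) (k : String) :
    pvLookupB none r k = (PySem.Dict.mk r).get? k := by
  unfold pvLookupB; cases h : (PySem.Dict.mk r).get? k <;> simp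

theorem pvLookup_sent (n : Int) (r : List (String × Int)) (k : String) :
    (PySem.Dict.mk (pvSentFillA n r)).get? k = pvLookupB (some n) r k := by
  unfold pvSentFillA pvLookupB
  by_cases hc : (PySem.Dict.mk r).contains "Sentiment"
  · simp [hc]
    cases h : (PySem.Dict.mk r).get? k with
    | none =>
      have : k ≠ "Sentiment" := by
        intro hk; subst hk
        rw [PySem.Dict.contains_eq_isSome_get?, h] at hc; simp at hc
      simp [this]
    | some v => rfl
  · simp [hc]
    have hd : (PySem.Dict.mk (((PySem.Dict.mk r).insert "Sentiment" n).items)) =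
        (PySem.Dict.mk r).insert "Sentiment" n := rfl
    rw [hd, PySem.Dict.get?_insert]
    by_cases hk : k = "Sentiment"
    · subst hk
      have : (PySem.Dict.mk r).get? "Sentiment" = none := by
        rw [PySem.Dict.contains_eq_isSome_get?] at hc
        simp at hc
        cases h : (PySem.Dict.mk r).get? "Sentiment" with
        | none => rfl
        | some v => rw [h] at hc; simp at hc
      simp [this]
    · simp [hk]
      cases h : (PySem.Dict.mk r).get? k <;> simp

-- characterisation of A's _groupby dict
theorem pvGroupbyA_getD (f : String) (l : List (List (String × Int))) (i : Int) :
    (pvGroupbyA f l).getD i [] =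
      (PySem.List.sorted (l.filter (fun r => (PySem.Dict.mk r).contains f))
          (fun r => (PySem.Dict.mk r).getD f 0) false).filter
        (fun r => (PySem.Dict.mk r).getD f 0 == i) := by
  unfold pvGroupbyA
  rw [PySem.Dict.getD_foldl_modify_append]
  simp [PySem.Dict.getD_empty, List.filter_map, Function.comp_def]

theorem pvGroupbyA_keys (f : String) (l : List (List (String × Int))) :
    (pvGroupbyA f l).keys = PySem.Set.ofList
      ((PySem.List.sorted (l.filter (fun r => (PySem.Dict.mk r).contains f))
          (fun r => (PySem.Dict.mk r).getD f 0) false).map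
        (fun r => (PySem.Dict.mk r).getD f 0)) := by
  unfold pvGroupbyA
  rw [PySem.Dict.keys_foldl_modify_key (key := Prod.fst)]
  simp [PySem.Set.update, PySem.Set.ofList, PySem.Dict.keys_empty, Function.comp_def]

theorem pv_contains_getD_eq (r : List (String × Int)) (f : String) (i : Int) :
    ((PySem.Dict.mk r).contains f && ((PySem.Dict.mk r).getD f 0 == i)) =
      ((PySem.Dict.mk r).get? f == some i) := by
  rw [PySem.Dict.contains_eq_isSome_get?, PySem.Dict.getD_eq_get?_getD]
  cases h : (PySem.Dict.mk r).get? f <;> simp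

theorem pvGroupbyA_len (f : String) (l : List (List (String × Int))) (i : Int) :
    ((pvGroupbyA f l).getD i []).length =
      l.countP (fun r => (PySem.Dict.mk r).get? f == some i) := by
  rw [pvGroupbyA_getD, ← List.countP_eq_length_filter,
    (PySem.List.sorted_perm _ _ _).countP_eq, List.countP_filter]
  apply List.countP_congr
  intro r _
  rw [Bool.and_comm, pv_contains_getD_eq]

theorem pvGroupbyA_keys_mem (f : String) (l : List (List (String × Int))) (x : Int) :
    x ∈ (pvGroupbyA f l).keys ↔ ∃ r ∈ l, (PySem.Dict.mk r).get? f = some x := by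
  rw [pvGroupbyA_keys, PySem.Set.mem_ofList]
  simp only [List.mem_map, PySem.List.mem_sorted, List.mem_filter]
  constructor
  · rintro ⟨r, ⟨hrl, hc⟩, hv⟩
    refine ⟨r, hrl, ?_⟩
    have h := pv_contains_getD_eq r f x
    rw [hc, hv] at h; simp at h
    exact h
  · rintro ⟨r, hrl, hv⟩
    have hc : (PySem.Dict.mk r).contains f = true := by
      rw [PySem.Dict.contains_eq_isSome_get?, hv]; rfl
    have h := pv_contains_getD_eq r f x
    rw [hc, hv] at h; simp at h
    exact ⟨r, ⟨hrl, hc⟩, h⟩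

theorem pvGroupbyA_keys_nodup (f : String) (l : List (List (String × Int))) :
    (pvGroupbyA f l).keys.Nodup := by
  rw [pvGroupbyA_keys]; exact PySem.Set.nodup_ofList _

-- A's nested groupby counts the rows hitting (i, x)
theorem pv_countA (fn gf : String) (l : List (List (String × Int))) (i x : Int) :
    ((pvGroupbyA gf ((pvGroupbyA fn l).getD i [])).getD x []).length =
      l.countP (fun r => (PySem.Dict.mk r).get? fn == some i &&
                         (PySem.Dict.mk r).get? gf == some x) := by
  rw [pvGroupbyA_len, pvGroupbyA_getD, List.countP_filter,
      (PySem.List.sorted_perm _ _ _).countP_eq, List.countP_filter]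
  apply List.countP_congr
  intro r _
  rw [← pv_contains_getD_eq r fn i]
  cases (PySem.Dict.mk r).contains fn <;>
    cases h2 : ((PySem.Dict.mk r).getD fn 0 == i) <;>
      cases h3 : ((PySem.Dict.mk r).get? gf == some x) <;> rfl

-- B's fold, first component: the counter counts rows whose two lookups hit (i, x)
theorem pvStepB_fst (fill : Option Int) (f g : String)
    (data : List (List (String × Int))) (d : PySem.Dict (Int × Int) Int) (s : PySem.Set Int)
    (i x : Int) :
    (data.foldl (pvStepB fill f g) (d, s)).1.getD (i, x) 0 =
      d.getD (i, x) 0 + (data.countP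
        (fun r => pvLookupB fill r f == some i && pvLookupB fill r g == some x) : Int) := by
  induction data generalizing d s with
  | nil => simp
  | cons r t ih =>
    simp only [List.foldl_cons]
    cases hf : pvLookupB fill r f with
    | none => simp [pvStepB, hf, ih]
    | some fv =>
      cases hg : pvLookupB fill r g with
      | none => simp [pvStepB, hf, hg, ih]
      | some gv =>
        simp only [pvStepB, hf, hg]
        rw [ih, PySem.Dict.getD_insert, List.countP_cons]
        simp only [hf, hg]
        by_cases h1 : i = fv <;> by_cases h2 : x = gv <;>
          simp [h1, h2, Prod.ext_iff] <;> omega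

-- B's fold, second component: the set of field values seen
theorem pvStepB_snd_mem (fill : Option Int) (f g : String)
    (data : List (List (String × Int))) (d : PySem.Dict (Int × Int) Int) (s : PySem.Set Int)
    (x : Int) :
    x ∈ (data.foldl (pvStepB fill f g) (d, s)).2 ↔
      x ∈ s ∨ ∃ r ∈ data, pvLookupB fill r f = some x := by
  induction data generalizing d s with
  | nil => simp
  | cons r t ih =>
    simp only [List.foldl_cons]
    cases hf : pvLookupB fill r f with
    | none =>
      simp only [pvStepB, hf]
      rw [ih]
      constructor
      · rintro (h | ⟨rr, hr, hv⟩)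
        · exact Or.inl h
        · exact Or.inr ⟨rr, List.mem_cons_of_mem _ hr, hv⟩
      · rintro (h | ⟨rr, hr, hv⟩)
        · exact Or.inl h
        · rcases List.mem_cons.mp hr with rfl | hr'
          · rw [hf] at hv; cases hv
          · exact Or.inr ⟨rr, hr', hv⟩
    | some fv =>
      have key : ∀ (d' : PySem.Dict (Int × Int) Int),
          x ∈ (t.foldl (pvStepB fill f g) (d', PySem.Set.add s fv)).2 ↔
            x ∈ s ∨ ∃ rr ∈ r :: t, pvLookupB fill rr f = some x := by
        intro d'
        rw [ih, PySem.Set.mem_add]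
        constructor
        · rintro ((h | h) | ⟨rr, hr, hv⟩)
          · exact Or.inl h
          · exact Or.inr ⟨r, List.mem_cons_self .., by rw [hf, h]⟩
          · exact Or.inr ⟨rr, List.mem_cons_of_mem _ hr, hv⟩
        · rintro (h | ⟨rr, hr, hv⟩)
          · exact Or.inl (Or.inl h)
          · rcases List.mem_cons.mp hr with rfl | hr'
            · rw [hf] at hv
              exact Or.inl (Or.inr (Option.some.inj hv).symm)
            · exact Or.inr ⟨rr, hr', hv⟩
      cases hg : pvLookupB fill r g with
      | none => simp only [pvStepB, hf, hg]; exact key _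
      | some gv => simp only [pvStepB, hf, hg]; exact key _

theorem pvStepB_snd_nodup (fill : Option Int) (f g : String)
    (data : List (List (String × Int))) (d : PySem.Dict (Int × Int) Int) (s : PySem.Set Int)
    (h : s.Nodup) : (data.foldl (pvStepB fill f g) (d, s)).2.Nodup := by
  induction data generalizing d s with
  | nil => simpa
  | cons r t ih =>
    simp only [List.foldl_cons]
    cases hf : pvLookupB fill r f with
    | none => simp only [pvStepB, hf]; exact ih d s h
    | some fv =>
      cases hg : pvLookupB fill r g with
      | none => simp only [pvStepB, hf, hg]; exact ih _ _ (PySem.Set.nodup_add _ _ h)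
      | some gv => simp only [pvStepB, hf, hg]; exact ih _ _ (PySem.Set.nodup_add _ _ h)

-- the generic bridge, parametrised by the row substitution σ A applies to data
theorem pv_main_gen (fn gf : String) (indices : List Int) (keys : Option (List Int))
    (data : List (List (String × Int))) (fill : Option Int)
    (σ : List (String × Int) → List (String × Int))
    (hσ : ∀ r k, (PySem.Dict.mk (σ r)).get? k = pvLookupB fill r k) :
    (let grouped := pvGroupbyA fn (data.map σ)
     let ks : List Int :=
       match keys with
       | some l => if l.isEmpty
           then PySem.List.sorted grouped.keys (fun x => x) false
           else (List.range l.length).map (fun n => (n : Int))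
       | none => PySem.List.sorted grouped.keys (fun x => x) false
     ks.foldl (fun responses i =>
         responses ++ [indices.map (fun x =>
           (((pvGroupbyA gf (grouped.getD i [])).getD x []).length : Int))]) []) =
    (let st := data.foldl (pvStepB fill fn gf) (PySem.Dict.empty, PySem.Set.empty)
     let ks : List Int :=
       match keys with
       | some l => if l.isEmpty then PySem.List.sorted st.2 (fun x => x) false
                   else (List.range l.length).map (fun n => (n : Int))
       | none => PySem.List.sorted st.2 (fun x => x) false
     ks.map (fun i => indices.map (fun x => st.1.getD (i, x) 0))) := by
  dsimp only
  rw [PySem.List.foldl_append_singleton_eq_map, List.nil_append]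
  have hcount : ∀ i x : Int,
      ((((pvGroupbyA gf ((pvGroupbyA fn (data.map σ)).getD i [])).getD x []).length : Int)) =
        (data.foldl (pvStepB fill fn gf) (PySem.Dict.empty, PySem.Set.empty)).1.getD (i, x) 0 := by
    intro i x
    rw [pv_countA, pvStepB_fst, PySem.Dict.getD_empty, List.countP_map]
    rw [List.countP_congr
      (q := fun r => pvLookupB fill r fn == some i && pvLookupB fill r gf == some x)
      (by intro r _; simp [Function.comp_apply, hσ])]
    simp
  have hkeys : PySem.List.sorted (pvGroupbyA fn (data.map σ)).keys (fun x => x) false =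
      PySem.List.sorted (data.foldl (pvStepB fill fn gf)
        (PySem.Dict.empty, PySem.Set.empty)).2 (fun x => x) false := by
    rw [PySem.List.sorted_id_eq_sorted_id_iff_perm]
    rw [List.perm_ext_iff_of_nodup (pvGroupbyA_keys_nodup _ _)
      (pvStepB_snd_nodup _ _ _ _ _ PySem.Set.empty List.nodup_nil)]
    intro y
    rw [pvGroupbyA_keys_mem, pvStepB_snd_mem]
    simp only [List.mem_map]
    constructor
    · rintro ⟨r, ⟨rr, hrr, rfl⟩, hv⟩
      rw [hσ] at hv
      exact Or.inr ⟨rr, hrr, hv⟩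
    · rintro (h | ⟨rr, hrr, hv⟩)
      · cases h
      · exact ⟨σ rr, ⟨rr, hrr, rfl⟩, by rw [hσ]; exact hv⟩
  have hmapeq : ∀ ks : List Int,
      ks.map (fun i => indices.map (fun x =>
        (((pvGroupbyA gf ((pvGroupbyA fn (data.map σ)).getD i [])).getD x []).length : Int))) =
      ks.map (fun i => indices.map (fun x =>
        (data.foldl (pvStepB fill fn gf) (PySem.Dict.empty, PySem.Set.empty)).1.getD (i, x) 0)) := by
    intro ks
    apply List.map_congr_left
    intro i _
    apply List.map_congr_left
    intro x _
    exact hcount i x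
  match keys with
  | none => rw [hkeys]; exact hmapeq _
  | some l =>
    by_cases hl : l.isEmpty <;> simp only [hl, if_true]
    · rw [hkeys]; exact hmapeq _
    · exact hmapeq _

theorem pv_main (field_name : String) (data : List (List (String × Int)))
    (indices : List Int) (group_field : String) (keys : Option (List Int)) :
    field_count_by_scale field_name data indices group_field keys =
      field_count_by_scale_alt field_name data indices group_field keys := by
  unfold field_count_by_scale field_count_by_scale_alt
  by_cases hgf : group_field == "Sentiment"
  · simp only [hgf, if_true]
    exact pv_main_gen field_name group_field indices keys data
      (some (indices.length : Int)) (pvSentFillA (indices.length : Int))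
      (fun r k => pvLookup_sent (indices.length : Int) r k)
  · simp only [hgf]
    have := pv_main_gen field_name group_field indices keys data none id
      (fun r k => (pvLookup_none r k).symm)
    rwa [List.map_id] at this

-- ===== VERDICT (by name: the statement is the Claim_ definition above) =====
theorem field_count_by_scale_spec : Claim_equal_field_count_by_scale := by
  intro field_name data indices group_field keys _
  exact pv_main field_name data indices group_field keys
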